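-- pv_equiv track=rewrite | github.com/Lvijaysai/text_extractor | backend/ocr_engine/output_fields.py | ordered_unique_fields
-- ===== SOURCE A (Python) =====
-- def ordered_unique_fields(fields, preferred_order):
--     seen = set()
--     ordered = []
--
--     for field in preferred_order:
--         if field in fields and field not in seen:
--             ordered.append(field)
--             seen.add(field)
--
--     for field in fields:
--         if field not in seen:
--             ordered.append(field)
--             seen.add(field)
--
--     return tuple(ordered)
-- ===== SOURCE B (Python) =====
-- def ordered_unique_fields(fields, preferred_order):
--     # First preference index of each preferred field.
--     pref = {}
--     for i, f in enumerate(preferred_order):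
--         pref.setdefault(f, i)
--     L = len(preferred_order)
--     uniq = list(dict.fromkeys(fields))  # distinct fields, first-appearance order
--     n = len(uniq)
--     # Stable order by a single composite key: preference index first (L = "not
--     # preferred", after all preferred ones), first-appearance index as tie-break.
--     dec = sorted(enumerate(uniq), key=lambda p: pref.get(p[1], L) * n + p[0])
--     return tuple(f for _, f in dec)
-- ===== Notes on version B (the rewrite author's own statement) =====
-- stated objective: faster
-- what changed: Replaces the two guarded scans with a seen-set (and an O(n) 'field in fields' list test inside the first loop) by building a first-preference-index table, deduplicating fields once via dict.fromkeys, and stably sorting the distinct fields by a composite key (preference index, first-appearance index).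
import Mathlib
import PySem

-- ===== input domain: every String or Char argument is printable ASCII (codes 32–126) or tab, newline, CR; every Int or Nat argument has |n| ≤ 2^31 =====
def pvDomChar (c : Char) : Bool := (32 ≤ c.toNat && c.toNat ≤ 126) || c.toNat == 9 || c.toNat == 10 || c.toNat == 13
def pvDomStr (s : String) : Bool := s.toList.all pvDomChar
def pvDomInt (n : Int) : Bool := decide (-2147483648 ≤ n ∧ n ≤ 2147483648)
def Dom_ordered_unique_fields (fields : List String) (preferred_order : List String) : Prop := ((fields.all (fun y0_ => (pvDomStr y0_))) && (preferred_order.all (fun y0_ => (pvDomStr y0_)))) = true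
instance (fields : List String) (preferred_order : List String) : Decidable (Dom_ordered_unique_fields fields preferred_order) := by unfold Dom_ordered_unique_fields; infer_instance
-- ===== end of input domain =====

-- B replaces A's two guarded scans (with a list-membership test of `fields` inside the first loop)
-- by a first-preference-index table plus one stable sort of the deduplicated fields; a timing run reports B faster.

-- ===== PORT A =====
def ordered_unique_fields (fields : List String) (preferred_order : List String) : List String :=
  -- seen = set(); ordered = []; two guarded loops; return tuple(ordered)
  let st := preferred_order.foldl
    (fun (p : List String × PySem.Set String) field =>
      if fields.contains field && !(PySem.Set.contains p.2 field) then
        (p.1 ++ [field], PySem.Set.add p.2 field) else p)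
    ([], PySem.Set.empty)
  let st2 := fields.foldl
    (fun (p : List String × PySem.Set String) field =>
      if !(PySem.Set.contains p.2 field) then
        (p.1 ++ [field], PySem.Set.add p.2 field) else p) st
  st2.1

-- ===== PORT B =====
def ordered_unique_fields_alt (fields : List String) (preferred_order : List String) : List String :=
  -- pref = {}; for i, f in enumerate(preferred_order): pref.setdefault(f, i)
  let pref : PySem.Dict String Int := (PySem.List.enumerate preferred_order).foldl
    (fun d p => if d.contains p.2 then d else d.insert p.2 p.1) PySem.Dict.empty
  let L : Int := preferred_order.length
  let uniq := PySem.List.dedup fields          -- list(dict.fromkeys(fields))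
  let n : Int := uniq.length
  -- dec = sorted(enumerate(uniq), key=lambda p: pref.get(p[1], L) * n + p[0])
  let dec := PySem.List.sorted (PySem.List.enumerate uniq)
    (fun p => pref.getD p.2 L * n + p.1) false
  dec.map (fun p => p.2)                       -- tuple(f for _, f in dec)

-- ===== PRECONDITION & SPEC =====
def Spec_ordered_unique_fields (fields : List String) (preferred_order : List String) (out : List String) : Prop := out = ordered_unique_fields_alt fields preferred_order
instance (fields : List String) (preferred_order : List String) (out : List String) : Decidable (Spec_ordered_unique_fields fields preferred_order out) := by unfold Spec_ordered_unique_fields; infer_instance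

-- ===== CLAIM (what is proved, stated in full; the proofs are below) =====
def Claim_equal_ordered_unique_fields : Prop := ∀ (fields : List String) (preferred_order : List String), Dom_ordered_unique_fields fields preferred_order → Spec_ordered_unique_fields fields preferred_order (ordered_unique_fields fields preferred_order)

-- ===== LEMMAS AND PROOFS =====

theorem foldl_add_eq_append_filter (t : List String) : ∀ (s : List String),
    t.foldl PySem.Set.add s = s ++ (PySem.Set.ofList t).filter (fun z => !s.contains z) := by
  induction t with
  | nil => intro s; simp [PySem.Set.ofList, PySem.Set.empty]
  | cons y r ih =>
    intro s
    have hof : PySem.Set.ofList (y :: r) = r.foldl PySem.Set.add [y] := by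
      simp [PySem.Set.ofList, PySem.Set.empty, List.foldl_cons, PySem.Set.add, PySem.Set.contains]
    have hr : r.foldl PySem.Set.add [y] = [y] ++ (PySem.Set.ofList r).filter (fun z => !([y] : List String).contains z) := ih [y]
    rw [List.foldl_cons]
    by_cases hy : y ∈ s
    · have hadd : PySem.Set.add s y = s := by
        simp [PySem.Set.add, PySem.Set.contains, hy]
      rw [hadd, ih s, hof, hr]
      have h1 : (([y] ++ (PySem.Set.ofList r).filter (fun z => !([y] : List String).contains z)).filter (fun z => !s.contains z))
          = ((PySem.Set.ofList r).filter (fun z => !([y] : List String).contains z)).filter (fun z => !s.contains z) := by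
        simp [List.filter, hy]
      rw [h1, List.filter_filter]
      congr 1
      apply List.filter_congr
      intro a _
      by_cases hax : a = y
      · subst hax; simp [hy]
      · simp [hax]
    · have hadd : PySem.Set.add s y = s ++ [y] := by
        simp [PySem.Set.add, PySem.Set.contains, hy]
      rw [hadd, ih (s ++ [y]), hof, hr]
      have h1 : (([y] ++ (PySem.Set.ofList r).filter (fun z => !([y] : List String).contains z)).filter (fun z => !s.contains z))
          = y :: ((PySem.Set.ofList r).filter (fun z => !([y] : List String).contains z)).filter (fun z => !s.contains z) := by
        simp [List.filter, hy]
      rw [h1, List.filter_filter, List.append_assoc]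
      simp only [List.singleton_append]
      congr 2
      apply List.filter_congr
      intro a _
      by_cases hax : a = y
      · subst hax; simp
      · simp [hax, hy]

theorem ofList_cons (x : String) (t : List String) :
    PySem.Set.ofList (x :: t) = x :: (PySem.Set.ofList t).filter (fun z => !(List.contains [x] z)) := by
  have hof : PySem.Set.ofList (x :: t) = t.foldl PySem.Set.add [x] := by
    simp [PySem.Set.ofList, PySem.Set.empty, List.foldl_cons, PySem.Set.add, PySem.Set.contains]
  rw [hof, foldl_add_eq_append_filter]
  rfl

theorem ofList_nodup_id (l : List String) (h : l.Nodup) : PySem.Set.ofList l = l := by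
  induction l with
  | nil => simp [PySem.Set.ofList, PySem.Set.empty]
  | cons x t ih =>
    rw [ofList_cons, ih (List.Nodup.of_cons h)]
    congr 1
    apply List.filter_eq_self.mpr
    intro a ha
    have hx : x ∉ t := (List.nodup_cons.mp h).1
    have : a ≠ x := by rintro rfl; exact hx ha
    simp [this]

theorem pairwise_idxOf_ofList (l : List String) :
    (PySem.Set.ofList l).Pairwise (fun a b => l.idxOf a < l.idxOf b) := by
  induction l with
  | nil => simp [PySem.Set.ofList, PySem.Set.empty]
  | cons x t ih =>
    rw [ofList_cons]
    constructor
    · intro b hb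
      have hbne : b ≠ x := by
        have := List.of_mem_filter hb
        simpa using this
      rw [List.idxOf_cons_self, List.idxOf_cons_ne _ hbne.symm]
      exact Nat.succ_pos _
    · have hsub : ((PySem.Set.ofList t).filter (fun z => !(List.contains [x] z))).Sublist (PySem.Set.ofList t) :=
        List.filter_sublist
      have hp := ih.sublist hsub
      apply hp.imp_of_mem
      intro a b ha hb hab
      have hane : a ≠ x := by have := List.of_mem_filter ha; simpa using this
      have hbne : b ≠ x := by have := List.of_mem_filter hb; simpa using this
      rw [List.idxOf_cons_ne _ hane.symm, List.idxOf_cons_ne _ hbne.symm]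
      omega

theorem pairwise_idxOf_nodup (l : List String) (h : l.Nodup) :
    l.Pairwise (fun a b => l.idxOf a < l.idxOf b) := by
  have := pairwise_idxOf_ofList l
  rwa [ofList_nodup_id l h] at this

theorem idxOf_filter_lt (c : String → Bool) (l : List String) : ∀ (a b : String),
    a ∈ l.filter c → b ∈ l.filter c →
    (l.filter c).idxOf a < (l.filter c).idxOf b → l.idxOf a < l.idxOf b := by
  induction l with
  | nil => intro a b ha; simp at ha
  | cons x t ih =>
    intro a b ha hb hlt
    by_cases hc : c x
    · rw [List.filter_cons_of_pos hc] at ha hb hlt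
      by_cases hax : x = a
      · subst hax
        have hbx : b ≠ x := by
          rintro rfl
          simp at hlt
        rw [List.idxOf_cons_self, List.idxOf_cons_ne _ hbx.symm]
        exact Nat.succ_pos _
      · have hbx : x ≠ b := by
          rintro rfl
          simp [List.idxOf_cons_self] at hlt
        rw [List.idxOf_cons_ne _ hax, List.idxOf_cons_ne _ hbx] at hlt
        have ha' : a ∈ t.filter c := by
          rcases List.mem_cons.mp ha with h | h
          · exact absurd h.symm hax
          · exact h
        have hb' : b ∈ t.filter c := by
          rcases List.mem_cons.mp hb with h | h
          · exact absurd h.symm (fun e => hbx e)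
          · exact h
        rw [List.idxOf_cons_ne _ hax, List.idxOf_cons_ne _ hbx]
        have := ih a b ha' hb' (by omega)
        omega
    · rw [List.filter_cons_of_neg hc] at ha hb hlt
      have hax : x ≠ a := by
        rintro rfl
        exact hc (List.of_mem_filter ha)
      have hbx : x ≠ b := by
        rintro rfl
        exact hc (List.of_mem_filter hb)
      rw [List.idxOf_cons_ne _ hax, List.idxOf_cons_ne _ hbx]
      have := ih a b ha hb hlt
      omega

theorem loop1_eq (c : String → Bool) (l : List String) : ∀ (s : List String),
    l.foldl (fun (p : List String × PySem.Set String) field =>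
        if c field && !(PySem.Set.contains p.2 field) then
          (p.1 ++ [field], PySem.Set.add p.2 field) else p) (s, s)
      = ((l.filter c).foldl PySem.Set.add s, (l.filter c).foldl PySem.Set.add s) := by
  induction l with
  | nil => intro s; simp
  | cons x t ih =>
    intro s
    rw [List.foldl_cons]
    by_cases hc : c x
    · by_cases hs : PySem.Set.contains s x
      · have hx : x ∈ s := by simpa [PySem.Set.contains] using hs
        have hadd : PySem.Set.add s x = s := by simp [PySem.Set.add, PySem.Set.contains, hx]
        have hstep : (if (c x && !PySem.Set.contains ((s, s) : List String × PySem.Set String).2 x) = true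
            then ((s, s).1 ++ [x], PySem.Set.add ((s, s) : List String × PySem.Set String).2 x)
            else ((s, s) : List String × PySem.Set String)) = (s, s) := by
          simp [hc, PySem.Set.contains, hx]
        rw [hstep, List.filter_cons_of_pos hc, List.foldl_cons, hadd]
        exact ih s
      · have hx : x ∉ s := by simpa [PySem.Set.contains] using hs
        have hadd : PySem.Set.add s x = s ++ [x] := by simp [PySem.Set.add, PySem.Set.contains, hx]
        have hstep : (if (c x && !PySem.Set.contains ((s, s) : List String × PySem.Set String).2 x) = true
            then ((s, s).1 ++ [x], PySem.Set.add ((s, s) : List String × PySem.Set String).2 x)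
            else ((s, s) : List String × PySem.Set String)) = (s ++ [x], s ++ [x]) := by
          simp [hc, PySem.Set.contains, hx, hadd]
        rw [hstep, List.filter_cons_of_pos hc, List.foldl_cons, hadd]
        exact ih (s ++ [x])
    · have hstep : (if (c x && !PySem.Set.contains ((s, s) : List String × PySem.Set String).2 x) = true
          then ((s, s).1 ++ [x], PySem.Set.add ((s, s) : List String × PySem.Set String).2 x)
          else ((s, s) : List String × PySem.Set String)) = (s, s) := by
        simp [hc]
      rw [hstep, List.filter_cons_of_neg hc]
      exact ih s

theorem loop2_eq (l : List String) : ∀ (s : List String),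
    l.foldl (fun (p : List String × PySem.Set String) field =>
        if !(PySem.Set.contains p.2 field) then
          (p.1 ++ [field], PySem.Set.add p.2 field) else p) (s, s)
      = (l.foldl PySem.Set.add s, l.foldl PySem.Set.add s) := by
  induction l with
  | nil => intro s; simp
  | cons x t ih =>
    intro s
    rw [List.foldl_cons, List.foldl_cons]
    by_cases hs : PySem.Set.contains s x
    · have hx : x ∈ s := by simpa [PySem.Set.contains] using hs
      have hadd : PySem.Set.add s x = s := by simp [PySem.Set.add, PySem.Set.contains, hx]
      have hstep : (if (!PySem.Set.contains ((s, s) : List String × PySem.Set String).2 x) = true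
          then ((s, s).1 ++ [x], PySem.Set.add ((s, s) : List String × PySem.Set String).2 x)
          else ((s, s) : List String × PySem.Set String)) = (s, s) := by
        simp [PySem.Set.contains, hx]
      rw [hstep, hadd]
      exact ih s
    · have hx : x ∉ s := by simpa [PySem.Set.contains] using hs
      have hadd : PySem.Set.add s x = s ++ [x] := by simp [PySem.Set.add, PySem.Set.contains, hx]
      have hstep : (if (!PySem.Set.contains ((s, s) : List String × PySem.Set String).2 x) = true
          then ((s, s).1 ++ [x], PySem.Set.add ((s, s) : List String × PySem.Set String).2 x)
          else ((s, s) : List String × PySem.Set String)) = (s ++ [x], s ++ [x]) := by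
        simp [PySem.Set.contains, hx, hadd]
      rw [hstep, hadd]
      exact ih (s ++ [x])

theorem A_characterization (fields preferred_order : List String) :
    ordered_unique_fields fields preferred_order
      = PySem.Set.ofList (preferred_order.filter (fun f => fields.contains f) ++ fields) := by
  unfold ordered_unique_fields
  show (fields.foldl _ (preferred_order.foldl _ ([], PySem.Set.empty))).1 = _
  have h0 : (PySem.Set.empty : PySem.Set String) = ([] : List String) := rfl
  rw [h0]
  rw [loop1_eq (fun f => fields.contains f) preferred_order []]
  rw [loop2_eq fields]
  show fields.foldl PySem.Set.add ((preferred_order.filter fun f => fields.contains f).foldl PySem.Set.add []) = _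
  rw [PySem.Set.ofList, List.foldl_append]
  rfl

theorem pref_get (l : List String) : ∀ (s : Int) (d : PySem.Dict String Int) (f : String),
    ((PySem.List.enumerate l s).foldl
        (fun d p => if d.contains p.2 then d else d.insert p.2 p.1) d).get? f
      = if d.contains f then d.get? f
        else if f ∈ l then some (s + l.idxOf f) else d.get? f := by
  induction l with
  | nil =>
    intro s d f
    simp [PySem.List.enumerate]
  | cons x t ih =>
    intro s d f
    rw [PySem.List.enumerate_cons, List.foldl_cons]
    by_cases hx : d.contains x
    · rw [if_pos hx]
      rw [ih (s + 1) d f]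
      by_cases hf : d.contains f
      · simp [hf]
      · have hfx : f ≠ x := by rintro rfl; exact hf hx
        rw [if_neg hf, if_neg hf]
        by_cases hft : f ∈ t
        · rw [if_pos hft, if_pos (List.mem_cons_of_mem _ hft), List.idxOf_cons_ne _ hfx.symm]
          congr 1
          push_cast [Nat.succ_eq_add_one]
          ring
        · rw [if_neg hft, if_neg (by simp [hfx, hft])]
    · rw [if_neg hx]
      rw [ih (s + 1) (d.insert x s) f]
      by_cases hfx : f = x
      · subst hfx
        have hc : (d.insert f s).contains f = true := by
          rw [PySem.Dict.contains_eq_isSome_get?, PySem.Dict.get?_insert_self]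
          rfl
        rw [if_pos hc, PySem.Dict.get?_insert_self, if_neg hx, if_pos (List.mem_cons_self ..)]
        rw [List.idxOf_cons_self]
        norm_num
      · have hc : (d.insert x s).contains f = d.contains f := by
          rw [PySem.Dict.contains_eq_isSome_get?, PySem.Dict.contains_eq_isSome_get?,
            PySem.Dict.get?_insert_of_ne _ _ hfx]
        have hg : (d.insert x s).get? f = d.get? f := PySem.Dict.get?_insert_of_ne _ _ hfx
        rw [hc, hg]
        by_cases hf : d.contains f
        · simp [hf]
        · rw [if_neg hf, if_neg hf]
          by_cases hft : f ∈ t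
          · rw [if_pos hft, if_pos (List.mem_cons_of_mem _ hft), List.idxOf_cons_ne _ (Ne.symm hfx)]
            congr 1
            push_cast [Nat.succ_eq_add_one]
            ring
          · rw [if_neg hft, if_neg (by simp [hfx, hft])]

theorem pref_getD (l : List String) (f : String) (L : Int) :
    ((PySem.List.enumerate l).foldl
        (fun d p => if d.contains p.2 then d else d.insert p.2 p.1) PySem.Dict.empty).getD f L
      = if f ∈ l then (l.idxOf f : Int) else L := by
  have h0 : (PySem.Dict.empty : PySem.Dict String Int).contains f = false := by
    rw [PySem.Dict.contains_eq_isSome_get?, PySem.Dict.get?_empty]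
    rfl
  rw [PySem.Dict.getD, pref_get l 0 PySem.Dict.empty f, if_neg (by simp [h0])]
  by_cases hf : f ∈ l
  · simp [hf]
  · simp [hf, PySem.Dict.get?_empty]

theorem enumerate_eq_map_g (l : List String) (h : l.Nodup) :
    PySem.List.enumerate l = l.map (fun f => ((l.idxOf f : Int), f)) := by
  apply List.ext_getElem
  · simp [PySem.List.length_enumerate]
  · intro k h1 h2
    have hk : k < l.length := by simpa [PySem.List.length_enumerate] using h1
    rw [PySem.List.getElem_enumerate]
    simp only [List.getElem_map]
    rw [List.Nodup.idxOf_getElem h k hk]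
    norm_num

theorem key_lt_of_lt {pa pb ia ib n : Int} (h : pa < pb) (hia : ia < n) (hia0 : 0 ≤ ia) (hib : 0 ≤ ib) :
    pa * n + ia < pb * n + ib := by
  have hn0 : (0:Int) ≤ n := le_trans hia0 (le_of_lt hia)
  have h2 : (pa + 1) * n ≤ pb * n := mul_le_mul_of_nonneg_right (by omega) hn0
  nlinarith [h2]

theorem B_characterization (fields preferred_order : List String) :
    ordered_unique_fields_alt fields preferred_order
      = PySem.Set.ofList (preferred_order.filter (fun f => fields.contains f) ++ fields) := by
  classical
  have huniq_nodup : (PySem.List.dedup fields).Nodup := by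
    rw [PySem.List.dedup_eq_ofList]; exact PySem.Set.nodup_ofList fields
  have hofu : PySem.Set.ofList fields = PySem.List.dedup fields := (PySem.List.dedup_eq_ofList fields).symm
  -- abbreviations (plain terms)
  have hmemu : ∀ a, a ∈ PySem.List.dedup fields ↔ a ∈ fields := fun a => PySem.List.mem_dedup fields a
  -- A's value
  have hAdecomp : PySem.Set.ofList (preferred_order.filter (fun f => fields.contains f) ++ fields)
      = PySem.Set.ofList (preferred_order.filter (fun f => fields.contains f))
        ++ (PySem.List.dedup fields).filter
            (fun z => !(PySem.Set.ofList (preferred_order.filter (fun f => fields.contains f))).contains z) := by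
    rw [PySem.Set.ofList, List.foldl_append, ← PySem.Set.ofList,
      foldl_add_eq_append_filter, hofu]
    rfl
  have hAnodup : (PySem.Set.ofList (preferred_order.filter (fun f => fields.contains f) ++ fields)).Nodup :=
    PySem.Set.nodup_ofList _
  have hmemA : ∀ a, a ∈ PySem.Set.ofList (preferred_order.filter (fun f => fields.contains f) ++ fields) ↔ a ∈ fields := by
    intro a
    rw [PySem.Set.mem_ofList, List.mem_append]
    constructor
    · rintro (h | h)
      · have := (List.mem_filter.mp h).2
        simpa using this
      · exact h
    · intro h; exact Or.inr h
  have hperm : (PySem.Set.ofList (preferred_order.filter (fun f => fields.contains f) ++ fields)).Perm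
      (PySem.List.dedup fields) := by
    rw [List.perm_ext_iff_of_nodup hAnodup huniq_nodup]
    intro a; rw [hmemA a, hmemu a]
  -- preference keys
  have hpk : ∀ f, ((PySem.List.enumerate preferred_order).foldl
        (fun d p => if d.contains p.2 then d else d.insert p.2 p.1) PySem.Dict.empty).getD f (preferred_order.length : Int)
      = if f ∈ preferred_order then (preferred_order.idxOf f : Int) else (preferred_order.length : Int) :=
    fun f => pref_getD preferred_order f _
  -- pairwise key ordering on A's value
  have hpair : (PySem.Set.ofList (preferred_order.filter (fun f => fields.contains f) ++ fields)).Pairwise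
      (fun a b =>
        ((PySem.List.enumerate preferred_order).foldl
          (fun d p => if d.contains p.2 then d else d.insert p.2 p.1) PySem.Dict.empty).getD a (preferred_order.length : Int)
            * ((PySem.List.dedup fields).length : Int) + ((PySem.List.dedup fields).idxOf a : Int)
        < ((PySem.List.enumerate preferred_order).foldl
          (fun d p => if d.contains p.2 then d else d.insert p.2 p.1) PySem.Dict.empty).getD b (preferred_order.length : Int)
            * ((PySem.List.dedup fields).length : Int) + ((PySem.List.dedup fields).idxOf b : Int)) := by
    rw [hAdecomp]
    rw [List.pairwise_append]
    refine ⟨?_, ?_, ?_⟩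
    · -- preferred part: strictly increasing preference index
      apply (pairwise_idxOf_ofList (preferred_order.filter (fun f => fields.contains f))).imp_of_mem
      intro a b ha hb hab
      have haF : a ∈ preferred_order.filter (fun f => fields.contains f) := (PySem.Set.mem_ofList _ _).mp ha
      have hbF : b ∈ preferred_order.filter (fun f => fields.contains f) := (PySem.Set.mem_ofList _ _).mp hb
      have hlt := idxOf_filter_lt _ _ a b haF hbF hab
      have hap : a ∈ preferred_order := (List.mem_filter.mp haF).1
      have hbp : b ∈ preferred_order := (List.mem_filter.mp hbF).1
      have haf : a ∈ fields := by have := (List.mem_filter.mp haF).2; simpa using this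
      have hbf : b ∈ fields := by have := (List.mem_filter.mp hbF).2; simpa using this
      rw [hpk a, hpk b, if_pos hap, if_pos hbp]
      have hia : ((PySem.List.dedup fields).idxOf a : Int) < ((PySem.List.dedup fields).length : Int) := by
        exact_mod_cast List.idxOf_lt_length_of_mem ((hmemu a).mpr haf)
      apply key_lt_of_lt (by exact_mod_cast hlt) hia (by positivity) (by positivity)
    · -- rest part: strictly increasing first-appearance index, equal preference key
      apply ((pairwise_idxOf_nodup _ huniq_nodup).sublist (List.filter_sublist)).imp_of_mem
      intro a b ha hb hab
      have hanp : a ∉ preferred_order := by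
        intro hap
        have haf : a ∈ fields := (hmemu a).mp (List.mem_of_mem_filter ha)
        have : a ∈ PySem.Set.ofList (preferred_order.filter (fun f => fields.contains f)) := by
          rw [PySem.Set.mem_ofList]
          exact List.mem_filter.mpr ⟨hap, by simpa using haf⟩
        have hpred := List.of_mem_filter ha
        simp [PySem.Set.contains] at hpred
        rcases hpred with h | h
        · exact h hap
        · exact h haf
      have hbnp : b ∉ preferred_order := by
        intro hbp
        have hbf : b ∈ fields := (hmemu b).mp (List.mem_of_mem_filter hb)
        have : b ∈ PySem.Set.ofList (preferred_order.filter (fun f => fields.contains f)) := by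
          rw [PySem.Set.mem_ofList]
          exact List.mem_filter.mpr ⟨hbp, by simpa using hbf⟩
        have hpred := List.of_mem_filter hb
        simp [PySem.Set.contains] at hpred
        rcases hpred with h | h
        · exact h hbp
        · exact h hbf
      rw [hpk a, hpk b, if_neg hanp, if_neg hbnp]
      have : ((PySem.List.dedup fields).idxOf a : Int) < ((PySem.List.dedup fields).idxOf b : Int) := by
        exact_mod_cast hab
      linarith
    · -- cross: preferred keys come before the rest
      intro a ha b hb
      have haF : a ∈ preferred_order.filter (fun f => fields.contains f) := (PySem.Set.mem_ofList _ _).mp ha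
      have hap : a ∈ preferred_order := (List.mem_filter.mp haF).1
      have haf : a ∈ fields := by have := (List.mem_filter.mp haF).2; simpa using this
      have hbnp : b ∉ preferred_order := by
        intro hbp
        have hbf : b ∈ fields := (hmemu b).mp (List.mem_of_mem_filter hb)
        have : b ∈ PySem.Set.ofList (preferred_order.filter (fun f => fields.contains f)) := by
          rw [PySem.Set.mem_ofList]
          exact List.mem_filter.mpr ⟨hbp, by simpa using hbf⟩
        have hpred := List.of_mem_filter hb
        simp [PySem.Set.contains] at hpred
        rcases hpred with h | h
        · exact h hbp
        · exact h hbf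
      rw [hpk a, hpk b, if_pos hap, if_neg hbnp]
      have hia : ((PySem.List.dedup fields).idxOf a : Int) < ((PySem.List.dedup fields).length : Int) := by
        exact_mod_cast List.idxOf_lt_length_of_mem ((hmemu a).mpr haf)
      have hpa : ((preferred_order.idxOf a : Nat) : Int) < (preferred_order.length : Int) := by
        exact_mod_cast List.idxOf_lt_length_of_mem hap
      apply key_lt_of_lt hpa hia (by positivity) (by positivity)
  -- name the sorted result
  have hsorted : PySem.List.sorted (PySem.List.enumerate (PySem.List.dedup fields))
      (fun p => ((PySem.List.enumerate preferred_order).foldl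
          (fun d p => if d.contains p.2 then d else d.insert p.2 p.1) PySem.Dict.empty).getD p.2 (preferred_order.length : Int)
            * ((PySem.List.dedup fields).length : Int) + p.1)
      = (PySem.Set.ofList (preferred_order.filter (fun f => fields.contains f) ++ fields)).map
          (fun f => (((PySem.List.dedup fields).idxOf f : Int), f)) := by
    apply PySem.List.sorted_eq_of_perm_of_pairwise_lt
    · rw [enumerate_eq_map_g _ huniq_nodup]
      exact hperm.map _
    · rw [List.pairwise_map]
      exact hpair
  show (PySem.List.sorted (PySem.List.enumerate (PySem.List.dedup fields)) _ false).map (fun p => p.2) = _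
  rw [hsorted, List.map_map]
  simp [Function.comp_def]

theorem ordered_unique_fields_eq (fields preferred_order : List String) :
    ordered_unique_fields fields preferred_order = ordered_unique_fields_alt fields preferred_order :=
  (A_characterization fields preferred_order).trans (B_characterization fields preferred_order).symm

-- ===== VERDICT (by name: the statement is the Claim_ definition above) =====
theorem ordered_unique_fields_spec : Claim_equal_ordered_unique_fields := by
  intro fields preferred_order _
  show _ = _
  exact ordered_unique_fields_eq fields preferred_order
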